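-- pv_equiv track=rewrite | github.com/jkc-mycode/Coding_Study | 프로그래머스/unrated/120871. 저주의 숫자 3/저주의 숫자 3.py | solution
-- ===== SOURCE A (Python) =====
-- def solution(n):
--     val = []
--     d = 1
--     while len(val) <= n:
--         if d % 3 != 0 and '3' not in str(d):
--             val.append(d)
--         d += 1
--
--     return val[n-1]
-- ===== SOURCE B (Python) =====
-- def _p(q):
--     # q-th non-negative integer containing no digit 3 (write q in base 9,
--     # remap its digits 0..8 to 0,1,2,4,5,6,7,8,9)
--     if q <= 0:
--         return 0
--     q, b = divmod(q, 9)
--     return 10 * _p(q) + (b if b < 3 else b + 1)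
--
--
-- def solution(n):
--     # Closed form: every decade whose tens-prefix p has no digit 3 contains
--     # exactly 6 valid numbers (the last digits d != 3 with (p+d) % 3 != 0),
--     # so the answer lives in the ((n-1)//6)-th digit-3-free decade.
--     q, r = divmod(n - 1, 6)
--     p = _p(q)
--     digs = [[1, 2, 4, 5, 7, 8], [0, 1, 4, 6, 7, 9], [0, 2, 5, 6, 8, 9]][p % 3]
--     return 10 * p + digs[r]
-- ===== Notes on version B (the rewrite author's own statement) =====
-- stated objective: faster
-- what changed: A scans every integer from 1 upward, testing each and storing all hits in a list; B computes the answer in closed form: each digit-3-free decade contains exactly 6 valid numbers, so the answer is 10*p + digs[(n-1)%6] where p, the ((n-1)//6)-th digit-3-free integer, is obtained by a base-9 digit remap -- no scan and no list at all.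
-- intended difference: For n = 0 (outside the 1-indexed problem domain) A returns 1 only because val[n-1] = val[-1] wraps around to the single collected element, while B's closed form gives 8; neither value is specified, and B is not contorted to copy A's negative-index accident. — e.g. on solution(0): A returns 1, B returns 8
import Mathlib
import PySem

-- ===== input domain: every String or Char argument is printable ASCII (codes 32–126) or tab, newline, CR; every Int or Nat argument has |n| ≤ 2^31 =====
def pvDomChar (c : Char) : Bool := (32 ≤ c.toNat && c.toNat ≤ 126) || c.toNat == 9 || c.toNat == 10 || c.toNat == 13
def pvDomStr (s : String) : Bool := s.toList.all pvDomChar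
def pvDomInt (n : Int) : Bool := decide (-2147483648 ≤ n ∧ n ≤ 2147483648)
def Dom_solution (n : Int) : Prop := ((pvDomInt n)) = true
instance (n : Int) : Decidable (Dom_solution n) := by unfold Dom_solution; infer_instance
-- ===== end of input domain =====

-- B replaces A's scan-and-collect loop by a closed form: each digit-3-free decade holds exactly 6
-- valid numbers, so the answer is computed from (n-1) divmod 6 and a base-9 digit remap
-- (objective: faster; return value only — neither program mutates anything).

-- ===== PORT A =====
-- Helper lemmas needed by port A's termination argument (cited in decreasing_by) come first.

-- `'3' ∈ digit characters of n` ↔ `3 is a decimal digit of n` (bridge for Python's `'3' in str(d)`)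
theorem pvDigitCharFin : ∀ m : Fin 10, (Nat.digitChar m.val = '3' ↔ m.val = 3) := by decide

theorem pvDigitChar_eq_three_iff (m : Nat) (h : m < 10) : Nat.digitChar m = '3' ↔ m = 3 :=
  pvDigitCharFin ⟨m, h⟩

theorem pvMem3_toDigitsCore (f : Nat) : ∀ (n : Nat) (ds : List Char), n < f →
    ('3' ∈ Nat.toDigitsCore 10 f n ds ↔ 3 ∈ Nat.digits 10 n ∨ '3' ∈ ds) := by
  induction f with
  | zero => intro n ds h; omega
  | succ f ih =>
    intro n ds h
    by_cases h0 : n / 10 = 0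
    · have hn : n < 10 := by omega
      have hm : n % 10 = n := Nat.mod_eq_of_lt hn
      rcases Nat.eq_zero_or_pos n with hz | hp
      · subst hz; simp [Nat.toDigitsCore, Nat.digitChar]
      · rw [show Nat.toDigitsCore 10 (f+1) n ds = Nat.digitChar (n % 10) :: ds by
          simp [Nat.toDigitsCore, h0]]
        rw [Nat.digits_def' (by norm_num : 1 < 10) hp, h0]
        have hdc := pvDigitChar_eq_three_iff n hn
        simp only [List.mem_cons, Nat.digits_zero, List.not_mem_nil, or_false, hm]
        constructor
        · rintro (h | h)
          · exact Or.inl (hdc.mp h.symm).symm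
          · exact Or.inr h
        · rintro (h | h)
          · exact Or.inl (hdc.mpr h.symm).symm
          · exact Or.inr h
    · have hge : 10 ≤ n := by
        rcases Nat.lt_or_ge n 10 with hl | hg
        · exact absurd (Nat.div_eq_of_lt hl) h0
        · exact hg
      have hlt : n / 10 < f :=
        Nat.lt_of_lt_of_le (Nat.div_lt_self (by omega : 0 < n) (by norm_num : 1 < 10))
          (Nat.lt_succ_iff.mp h)
      rw [show Nat.toDigitsCore 10 (f+1) n ds
            = Nat.toDigitsCore 10 f (n / 10) (Nat.digitChar (n % 10) :: ds) by
          simp [Nat.toDigitsCore, h0]]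
      rw [ih (n / 10) _ hlt]
      rw [Nat.digits_def' (by norm_num : 1 < 10) (by omega : 0 < n)]
      have hm10 : n % 10 < 10 := Nat.mod_lt _ (by omega)
      have hdc := pvDigitChar_eq_three_iff (n % 10) hm10
      simp only [List.mem_cons]
      constructor
      · rintro (h | h | h)
        · exact Or.inl (Or.inr h)
        · exact Or.inl (Or.inl (hdc.mp h.symm).symm)
        · exact Or.inr h
      · rintro (h | h)
        · rcases h with h | h
          · exact Or.inr (Or.inl (hdc.mpr h.symm).symm)
          · exact Or.inl h
        · exact Or.inr (Or.inr h)

theorem pvMem3_toChars (n : Nat) :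
    '3' ∈ PySem.Int.toChars (n : Int) ↔ 3 ∈ Nat.digits 10 n := by
  have : PySem.Int.toChars (n : Int) = Nat.toDigits 10 n := by
    simp [PySem.Int.toChars]
  rw [this, Nat.toDigits]
  have := pvMem3_toDigitsCore (n + 1) n [] (by omega)
  simpa using this

theorem pvSingleton_infix_iff {α : Type} (c : α) (l : List α) : [c] <:+: l ↔ c ∈ l := by
  constructor
  · rintro ⟨s, t, rfl⟩; simp
  · intro h
    obtain ⟨s, t, rfl⟩ := List.append_of_mem h
    exact ⟨s, t, by simp⟩

theorem pvIsIn3_toStr (n : Nat) :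
    PySem.Str.isIn "3" (PySem.Int.toStr (n : Int)) = true ↔ 3 ∈ Nat.digits 10 n := by
  rw [PySem.Str.isIn_iff_infix]
  rw [show ("3".toList) = ['3'] from rfl]
  rw [PySem.Int.toList_toStr]
  rw [pvSingleton_infix_iff, pvMem3_toChars]

theorem pvPow10_mod3 (j : Nat) : 10 ^ j % 3 = 1 := by
  rw [Nat.pow_mod]; norm_num

theorem pvDigits_pow10 (j : Nat) : 3 ∉ Nat.digits 10 (10 ^ j) := by
  induction j with
  | zero =>
    rw [pow_zero, Nat.digits_def' (by norm_num : 1 < 10) (by norm_num : 0 < 1)]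
    simp
  | succ j ih =>
    rw [Nat.digits_def' (by norm_num : 1 < 10) (by positivity : 0 < 10 ^ (j + 1))]
    have h1 : 10 ^ (j + 1) % 10 = 0 := by
      rw [pow_succ]; exact Nat.mul_mod_left _ _
    have h2 : 10 ^ (j + 1) / 10 = 10 ^ j := by
      rw [pow_succ]; exact Nat.mul_div_cancel _ (by norm_num)
    rw [h1, h2]
    intro hmem
    rcases List.mem_cons.mp hmem with h | h
    · exact absurd h (by decide)
    · exact ih h

-- the loop guard of A, as Python writes it: `d % 3 != 0 and '3' not in str(d)`
def condA (d : Nat) : Bool :=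
  (PySem.Int.mod (d : Int) 3 != 0) && !(PySem.Str.isIn "3" (PySem.Int.toStr (d : Int)))

theorem pvCondA_pow10 (j : Nat) : condA (10 ^ j) = true := by
  have h1 : PySem.Int.mod ((10 ^ j : Nat) : Int) 3 = 1 := by
    have := PySem.Int.mod_natCast (10 ^ j) 3
    rw [pvPow10_mod3] at this
    exact_mod_cast this
  have h2 : PySem.Str.isIn "3" (PySem.Int.toStr ((10 ^ j : Nat) : Int)) = false := by
    rw [← Bool.not_eq_true, pvIsIn3_toStr]
    exact pvDigits_pow10 j
  unfold condA
  rw [h1, h2]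
  decide

-- distance from d to the next power of 10 (strictly above d)
def gap (d : Nat) : Nat := 10 ^ (Nat.log 10 d + 1) - d

theorem pvGap_pos (d : Nat) : 0 < gap d :=
  Nat.sub_pos_of_lt (Nat.lt_pow_succ_log_self (by norm_num : 1 < 10) d)

theorem pvLog_stable (d e : Nat) (h1 : d < e) (h2 : e < 10 ^ (Nat.log 10 d + 1)) :
    Nat.log 10 e = Nat.log 10 d := by
  apply Nat.log_eq_of_pow_le_of_lt_pow _ h2
  rcases Nat.eq_zero_or_pos d with hz | hp
  · subst hz; simpa using h1
  · exact le_trans (Nat.pow_log_le_self 10 (by omega)) (by omega)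

-- termination measure for A's scan: 0 on accepted d, else distance to the next power of 10
def mA (d : Nat) : Nat := if condA d then 0 else gap d

theorem pvLexA (n : Int) (val : List Int) (d : Int) (h : (val.length : Int) ≤ n) :
    (n + 1 - ((val ++ [d]).length : Int)).toNat < (n + 1 - (val.length : Int)).toNat := by
  have eNat : (val ++ [d]).length = val.length + 1 := by
    rw [List.length_append]
    rfl
  have e : ((val ++ [d]).length : Int) = (val.length : Int) + 1 := by
    rw [eNat]
    exact Nat.cast_add_one val.length
  have e1 : n + 1 - ((val.length : Int) + 1) = n - (val.length : Int) := by ring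
  have e2 : n + 1 - (val.length : Int) = (n - (val.length : Int)) + 1 := by ring
  rw [e, e1, e2]
  exact (Int.toNat_lt_toNat (Int.lt_add_one_iff.mpr (Int.sub_nonneg.mpr h))).mpr (lt_add_one _)

theorem pvMA_succ_lt (d : Nat) (h : condA d = false) : mA (d + 1) < mA d := by
  have hdlt : d < 10 ^ (Nat.log 10 d + 1) := Nat.lt_pow_succ_log_self (by norm_num) d
  by_cases hc : condA (d + 1) = true
  · simp only [mA, hc, h, if_true, Bool.false_eq_true, if_false]
    exact pvGap_pos d
  · have hb : d + 1 < 10 ^ (Nat.log 10 d + 1) := by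
      rcases Nat.lt_or_ge (d + 1) (10 ^ (Nat.log 10 d + 1)) with hl | hg
      · exact hl
      · exfalso
        have he : d + 1 = 10 ^ (Nat.log 10 d + 1) :=
          Nat.le_antisymm (Nat.succ_le_of_lt hdlt) hg
        exact hc (by rw [he]; exact pvCondA_pow10 _)
    have hl := pvLog_stable d (d + 1) (Nat.lt_succ_self d) hb
    simp only [mA, h, hc, Bool.false_eq_true, if_false, gap, hl]
    exact Nat.sub_lt_sub_left hdlt (Nat.lt_succ_self d)

-- while len(val) <= n: append d when the guard holds; d += 1
def loopA (n : Int) (val : List Int) (d : Nat) : List Int :=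
  if (val.length : Int) ≤ n then
    if condA d then loopA n (val ++ [(d : Int)]) (d + 1)
    else loopA n val (d + 1)
  else val
termination_by ((n + 1 - val.length).toNat, mA d)
decreasing_by
  · exact Prod.Lex.left _ _ (pvLexA n val _ ‹(val.length : Int) ≤ n›)
  · have := pvMA_succ_lt d (by simpa using ‹¬ condA d = true›)
    exact Prod.Lex.right _ this

def solution (n : Int) : Int :=
  PySem.List.pyGetD (loopA n [] 1) (n - 1) 0

-- ===== PORT B =====
-- termination helper for pFree, cited by name in its decreasing_by
theorem pvPFree_dec (q : Int) (h : ¬ q ≤ 0) : (PySem.Int.floordiv q 9).toNat < q.toNat := by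
  rw [PySem.Int.floordiv_eq_ediv_of_pos (by omega : (0 : Int) < 9)]
  omega

-- def _p(q): if q <= 0: return 0; q, b = divmod(q, 9); return 10*_p(q) + (b if b < 3 else b + 1)
def pFree (q : Int) : Int :=
  if q ≤ 0 then 0
  else
    10 * pFree (PySem.Int.floordiv q 9) +
      (if PySem.Int.mod q 9 < 3 then PySem.Int.mod q 9 else PySem.Int.mod q 9 + 1)
termination_by q.toNat
decreasing_by
  rename_i hq
  exact pvPFree_dec q hq

-- q, r = divmod(n - 1, 6); p = _p(q); digs = [...][p % 3]; return 10 * p + digs[r]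
-- (both list indices are always in range: p ≥ 0 so p % 3 ∈ {0,1,2}, and 0 ≤ r < 6 by Python's
--  divmod, so pyGetD with a dummy default is exact here)
def solution_alt (n : Int) : Int :=
  10 * pFree (PySem.Int.floordiv (n - 1) 6) +
    PySem.List.pyGetD
      (PySem.List.pyGetD
        ([[1, 2, 4, 5, 7, 8], [0, 1, 4, 6, 7, 9], [0, 2, 5, 6, 8, 9]] : List (List Int))
        (PySem.Int.mod (pFree (PySem.Int.floordiv (n - 1) 6)) 3) [])
      (PySem.Int.mod (n - 1) 6) 0

-- ===== PRECONDITION & SPEC =====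
-- Pre_ excludes n < 0, where A raises IndexError (val[n-1] on a list shorter than 1-n).
def Pre_solution (n : Int) : Prop := 0 ≤ n
instance (n : Int) : Decidable (Pre_solution n) := by unfold Pre_solution; infer_instance

def pvWitness_solution : Int := 5

-- For n = 0 (outside the 1-indexed problem domain) A returns 1 only because val[n-1] = val[-1]
-- wraps around to the single collected element, while B's closed form gives 8; neither value is
-- specified, and B is not contorted to copy A's negative-index accident.
def D_solution (n : Int) : Prop := n = 0
instance (n : Int) : Decidable (D_solution n) := by unfold D_solution; infer_instance

def Spec_solution (n : Int) (out : Int) : Prop := ¬ D_solution n → out = solution_alt n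
instance (n : Int) (out : Int) : Decidable (Spec_solution n out) := by
  unfold Spec_solution; infer_instance

def pvDiffWitness_solution : Int := 0
def pvDiffWitnessOut_solution : Int × Int := (1, 8)

-- ===== CLAIM (what is proved, stated in full; the proofs are below) =====
def Claim_unchanged_solution : Prop :=
  ∀ (n : Int), Dom_solution n → Pre_solution n → Spec_solution n (solution n)
def Claim_changed_solution : Prop :=
  Dom_solution (pvDiffWitness_solution) ∧ Pre_solution (pvDiffWitness_solution) ∧
    D_solution (pvDiffWitness_solution) ∧
    solution (pvDiffWitness_solution) = pvDiffWitnessOut_solution.1 ∧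
    solution_alt (pvDiffWitness_solution) = pvDiffWitnessOut_solution.2 ∧
    pvDiffWitnessOut_solution.1 ≠ pvDiffWitnessOut_solution.2
def Claim_exact_solution : Prop :=
  ∀ (n : Int), Dom_solution n → Pre_solution n → D_solution n → solution n ≠ solution_alt n

-- ===== LEMMAS AND PROOFS =====

-- `n contains the decimal digit 3`, as a Nat-level recursion used by the proofs
def has3 (x : Nat) : Bool :=
  if x = 0 then false
  else if x % 10 == 3 then true
  else has3 (x / 10)
decreasing_by exact Nat.div_lt_self (by omega) (by omega)

theorem pvHas3_iff (x : Nat) : has3 x = true ↔ 3 ∈ Nat.digits 10 x := by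
  fun_induction has3 x with
  | case1 => simp
  | case2 x hx h3 =>
    rw [Nat.digits_def' (by norm_num : 1 < 10) (by omega : 0 < x)]
    have h3' : x % 10 = 3 := by simpa using h3
    simp [h3']
  | case3 x hx h3 ih =>
    rw [Nat.digits_def' (by norm_num : 1 < 10) (by omega : 0 < x)]
    have h3' : x % 10 ≠ 3 := by simpa using h3
    rw [ih]
    simp [List.mem_cons, show ¬(3 = x % 10) from fun h => h3' h.symm]

-- A's guard, Nat-side
def goodb (d : Nat) : Bool := (decide (d % 3 ≠ 0)) && !has3 d

theorem pvCondA_eq_goodb (d : Nat) : condA d = goodb d := by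
  have h1 : PySem.Int.mod (d : Int) 3 = ((d % 3 : Nat) : Int) := by
    exact_mod_cast PySem.Int.mod_natCast d 3
  have h2 : PySem.Str.isIn "3" (PySem.Int.toStr (d : Int)) = has3 d := by
    cases hb : has3 d
    · rw [← Bool.not_eq_true, pvIsIn3_toStr]
      rw [← pvHas3_iff, hb]; simp
    · exact (pvIsIn3_toStr d).mpr ((pvHas3_iff d).mp hb)
  simp only [condA, goodb, h1, h2]
  congr 1
  by_cases hd : d % 3 = 0
  · simp [hd]
  · simp [hd]
    omega

-- first c guard-passing numbers ≥ d, in order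
def rest (c : Nat) (d : Nat) : List Int :=
  if 0 < c then
    if goodb d then (d : Int) :: rest (c - 1) (d + 1)
    else rest c (d + 1)
  else []
termination_by (c, mA d)
decreasing_by
  · apply Prod.Lex.left; omega
  · refine Prod.Lex.right _ (pvMA_succ_lt d ?_)
    rw [pvCondA_eq_goodb]; simpa using ‹¬ goodb d = true›

theorem pvRest_length (c d : Nat) : (rest c d).length = c := by
  fun_induction rest c d with
  | case1 c d hc hg ih => simp [ih]; omega
  | case2 c d hc hg ih => exact ih
  | case3 c d hc => simp; omega

theorem pvRest_prefix (c d : Nat) : rest c d <+: rest (c + 1) d := by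
  fun_induction rest c d with
  | case1 c d hc hg ih =>
    conv_rhs => rw [rest]
    rw [if_pos (by omega : 0 < c + 1), if_pos hg, Nat.add_sub_cancel]
    rw [show c - 1 + 1 = c from by omega] at ih
    exact (List.cons_prefix_cons).mpr ⟨rfl, ih⟩
  | case2 c d hc hg ih =>
    conv_rhs => rw [rest]
    rw [if_pos (by omega : 0 < c + 1), if_neg hg]
    exact ih
  | case3 c d hc =>
    exact List.nil_prefix

theorem pvLoopA_rest (n : Int) (val : List Int) (d : Nat) :
    loopA n val d = val ++ rest ((n + 1 - val.length).toNat) d := by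
  fun_induction loopA n val d with
  | case1 val d hle hcond ih =>
    rw [ih]
    have hg : goodb d = true := by rw [← pvCondA_eq_goodb]; exact hcond
    have ht : 0 < (n + 1 - (val.length : Int)).toNat := by omega
    conv_rhs => rw [rest]
    rw [if_pos ht, if_pos hg]
    have harith : ((n : Int) + 1 - ((val ++ [(d : Int)]).length : Int)).toNat
        = (n + 1 - (val.length : Int)).toNat - 1 := by
      simp only [List.length_append, List.length_cons, List.length_nil]
      push_cast
      omega
    rw [harith]
    simp
  | case2 val d hle hcond ih =>
    rw [ih]
    have hg : goodb d = false := by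
      rw [← pvCondA_eq_goodb]; simpa using hcond
    have ht : 0 < (n + 1 - (val.length : Int)).toNat := by omega
    conv_rhs => rw [rest]
    rw [if_pos ht, if_neg (by simp [hg])]
  | case3 val d hle =>
    have ht : (n + 1 - (val.length : Int)).toNat = 0 := by omega
    rw [ht, rest]
    simp

-- least good number ≥ d
def nxtGE (d : Nat) : Nat :=
  if goodb d then d else nxtGE (d + 1)
termination_by mA d
decreasing_by
  refine pvMA_succ_lt d ?_
  rw [pvCondA_eq_goodb]; simpa using ‹¬ goodb d = true›

theorem pvRest_cons (c d : Nat) (hc : 0 < c) :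
    rest c d = (nxtGE d : Int) :: rest (c - 1) (nxtGE d + 1) := by
  fun_induction nxtGE d with
  | case1 =>
    rename_i d hg
    rw [rest, if_pos hc, if_pos hg]
  | case2 =>
    rename_i d hg ih
    rw [rest, if_pos hc, if_neg (by simpa using hg)]
    exact ih

-- i-th (0-indexed) good number ≥ d
def nthF : Nat → Nat → Nat
  | 0, d => nxtGE d
  | i + 1, d => nthF i (nxtGE d + 1)

theorem pvLastRest (i : Nat) : ∀ d, (rest (i + 1) d).getLast? = some ((nthF i d : Nat) : Int) := by
  induction i with
  | zero =>
    intro d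
    rw [pvRest_cons 1 d (by omega)]
    rw [show (1 - 1 : Nat) = 0 from rfl, rest, if_neg (by omega : ¬ 0 < 0)]
    rfl
  | succ i ih =>
    intro d
    rw [pvRest_cons (i + 2) d (by omega), show (i + 2 - 1 : Nat) = i + 1 from rfl]
    rcases hrl : rest (i + 1) (nxtGE d + 1) with _ | ⟨b, l'⟩
    · exfalso
      have hl := pvRest_length (i + 1) (nxtGE d + 1)
      rw [hrl] at hl; simp at hl
    · rw [List.getLast?_cons_cons]
      rw [← hrl, ih]
      rfl

theorem pvNthF_succ (i : Nat) : ∀ d, nthF (i + 1) d = nxtGE (nthF i d + 1) := by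
  induction i with
  | zero => intro d; rfl
  | succ i ih =>
    intro d
    show nthF (i + 1) (nxtGE d + 1) = nxtGE (nthF i (nxtGE d + 1) + 1)
    exact ih (nxtGE d + 1)

theorem pvNxtGE_eq (d : Nat) : ∀ m, d ≤ m → goodb m = true →
    (∀ z, d ≤ z → z < m → goodb z = false) → nxtGE d = m := by
  fun_induction nxtGE d with
  | case1 d hg =>
    intro m hdm hm hbet
    rcases Nat.eq_or_lt_of_le hdm with he | hlt
    · exact he
    · exact absurd hg (by rw [hbet d le_rfl hlt]; simp)
  | case2 d hg ih =>
    intro m hdm hm hbet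
    have hdm' : d + 1 ≤ m := by
      rcases Nat.eq_or_lt_of_le hdm with he | hlt
      · exact absurd hm (by rw [← he]; simpa using hg)
      · omega
    exact ih m hdm' hm (fun z hz1 hz2 => hbet z (by omega) hz2)

-- decimal step: digits of 10*a + e
theorem pvHas3_step (a e : Nat) (he : e < 10) :
    has3 (10 * a + e) = ((e == 3) || has3 a) := by
  rw [has3]
  by_cases h0 : 10 * a + e = 0
  · have ha : a = 0 := by omega
    have he0 : e = 0 := by omega
    rw [if_pos h0, ha, he0]
    rw [show has3 0 = false from by rw [has3]; simp]
    rfl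
  · rw [if_neg h0]
    have hm : (10 * a + e) % 10 = e := by omega
    have hd : (10 * a + e) / 10 = a := by omega
    rw [hm, hd]
    by_cases h3 : e = 3
    · simp [h3]
    · rw [if_neg (by simpa using h3)]
      simp [h3]

-- base-9 digit remap, Nat-side
def mp (b : Nat) : Nat := if b < 3 then b else b + 1

-- k-th non-negative integer with no digit 3 (Nat-side mirror of _p)
def m9 (k : Nat) : Nat :=
  if k = 0 then 0 else 10 * m9 (k / 9) + mp (k % 9)
decreasing_by exact Nat.div_lt_self (by omega) (by omega)

theorem pvM9_eq (k : Nat) : m9 k = 10 * m9 (k / 9) + mp (k % 9) := by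
  by_cases h : k = 0
  · subst h
    rw [show (0/9 : Nat) = 0 from rfl, show (0 % 9 : Nat) = 0 from rfl]
    rw [show m9 0 = 0 from by rw [m9]; simp]
    rfl
  · rw [m9, if_neg h]

theorem pvMp_lt (b : Nat) (hb : b < 9) : mp b < 10 := by
  unfold mp; split_ifs <;> omega

theorem pvMp_ne3 (b : Nat) : mp b ≠ 3 := by
  unfold mp; split_ifs <;> omega

theorem pvM9_free (k : Nat) : has3 (m9 k) = false := by
  fun_induction m9 k with
  | case1 =>
    rw [has3]; simp
  | case2 =>
    rename_i k h ih
    rw [pvHas3_step _ _ (pvMp_lt _ (Nat.mod_lt _ (by omega)))]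
    rw [ih]
    simp [pvMp_ne3 (k % 9)]

theorem pvM9_succ (k : Nat) : m9 k < m9 (k + 1) ∧
    ∀ z, m9 k < z → z < m9 (k + 1) → has3 z = true := by
  induction k using Nat.strong_induction_on with
  | _ k ih =>
    rcases Nat.lt_or_ge (k % 9) 8 with hb | hb
    · -- last base-9 digit not maximal: same decade prefix
      have hdiv : (k + 1) / 9 = k / 9 := by omega
      have hmod : (k + 1) % 9 = k % 9 + 1 := by omega
      have ek := pvM9_eq k
      have ek1 := pvM9_eq (k + 1)
      rw [hdiv, hmod] at ek1
      set A := m9 (k / 9) with hA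
      set b := k % 9 with hbdef
      have hmp1 : mp b < mp (b + 1) := by unfold mp; split_ifs <;> omega
      have hmp2 : mp (b + 1) < 10 := pvMp_lt _ (by omega)
      constructor
      · omega
      · intro z hz1 hz2
        rw [ek] at hz1; rw [ek1] at hz2
        have he10 : z - 10 * A < 10 := by omega
        have hz : z = 10 * A + (z - 10 * A) := by omega
        have he3 : z - 10 * A = 3 := by
          have : mp b < z - 10 * A ∧ z - 10 * A < mp (b + 1) := by omega
          unfold mp at this; split_ifs at this <;> omega
        rw [hz, he3, pvHas3_step A 3 (by omega)]
        rfl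
    · -- last base-9 digit 8: carry into the prefix
      have hb8 : k % 9 = 8 := by omega
      have ha : k / 9 < k := by omega
      obtain ⟨hlt, hbet⟩ := ih (k / 9) ha
      have hdiv : (k + 1) / 9 = k / 9 + 1 := by omega
      have hmod : (k + 1) % 9 = 0 := by omega
      have ek := pvM9_eq k
      have ek1 := pvM9_eq (k + 1)
      rw [hdiv, hmod] at ek1
      rw [hb8] at ek
      have hmp8 : mp 8 = 9 := rfl
      have hmp0 : mp 0 = 0 := rfl
      rw [hmp8] at ek; rw [hmp0] at ek1
      set A := m9 (k / 9) with hA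
      set A' := m9 (k / 9 + 1) with hA'
      constructor
      · omega
      · intro z hz1 hz2
        rw [ek] at hz1; rw [ek1] at hz2
        have hzq1 : A < z / 10 := by omega
        have hzq2 : z / 10 < A' := by omega
        have hsplit : z = 10 * (z / 10) + z % 10 := by omega
        rw [hsplit, pvHas3_step (z / 10) (z % 10) (by omega)]
        rw [hbet (z / 10) hzq1 hzq2]
        simp

-- which last digits are good in a decade with prefix p: only p % 3 matters
def goodDigit (c e : Nat) : Bool := decide (e ≠ 3 ∧ (c + e) % 3 ≠ 0)

theorem pvGood_decade (p e : Nat) (hp : has3 p = false) (he : e < 10) :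
    goodb (10 * p + e) = goodDigit (p % 3) e := by
  unfold goodb goodDigit
  rw [pvHas3_step p e he, hp]
  have hm : (10 * p + e) % 3 = (p % 3 + e) % 3 := by omega
  rw [hm]
  by_cases h3 : e = 3
  · simp [h3]
  · simp [h3]

-- the per-residue tables of good last digits, Nat-side
def dig (c r : Nat) : Nat :=
  (([[1, 2, 4, 5, 7, 8], [0, 1, 4, 6, 7, 9], [0, 2, 5, 6, 8, 9]] : List (List Nat)).getD c
    []).getD r 0

theorem pvDig_good : ∀ c < 3, ∀ r < 6, goodDigit c (dig c r) = true ∧ dig c r < 10 := by decide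

theorem pvDig_mono : ∀ c < 3, ∀ r < 5, dig c r < dig c (r + 1) ∧
    ∀ e < 10, dig c r < e → e < dig c (r + 1) → goodDigit c e = false := by decide

theorem pvDig_top : ∀ c < 3, ∀ e < 10, dig c 5 < e → goodDigit c e = false := by decide

theorem pvDig_bot : ∀ c < 3, ∀ e, e < dig c 0 → goodDigit c e = false := by decide

-- B's closed form, Nat-side: the i-th (0-indexed) good number
def altN (i : Nat) : Nat := 10 * m9 (i / 6) + dig (m9 (i / 6) % 3) (i % 6)

theorem pvAltN_good (i : Nat) : goodb (altN i) = true := by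
  unfold altN
  rw [pvGood_decade _ _ (pvM9_free _) (pvDig_good _ (Nat.mod_lt _ (by omega)) _
    (Nat.mod_lt _ (by omega))).2]
  exact (pvDig_good _ (Nat.mod_lt _ (by omega)) _ (Nat.mod_lt _ (by omega))).1

theorem pvAltN_step (i : Nat) : altN i < altN (i + 1) ∧
    ∀ z, altN i < z → z < altN (i + 1) → goodb z = false := by
  have hc3 : ∀ j : Nat, m9 j % 3 < 3 := fun j => Nat.mod_lt _ (by omega)
  rcases Nat.lt_or_ge (i % 6) 5 with hr | hr
  · -- same decade
    have hdiv : (i + 1) / 6 = i / 6 := by omega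
    have hmod : (i + 1) % 6 = i % 6 + 1 := by omega
    unfold altN
    rw [hdiv, hmod]
    set p := m9 (i / 6) with hp
    set c := p % 3 with hcdef
    set r := i % 6 with hrdef
    have hmono := pvDig_mono c (hc3 _) r hr
    have htop := (pvDig_good c (hc3 _) (r + 1) (by omega)).2
    constructor
    · omega
    · intro z hz1 hz2
      have he10 : z - 10 * p < 10 := by omega
      have hz : z = 10 * p + (z - 10 * p) := by omega
      rw [hz, pvGood_decade p _ (pvM9_free _) he10]
      exact hmono.2 _ he10 (by omega) (by omega)
  · -- decade rollover
    have hr5 : i % 6 = 5 := by omega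
    have hdiv : (i + 1) / 6 = i / 6 + 1 := by omega
    have hmod : (i + 1) % 6 = 0 := by omega
    obtain ⟨hlt, hbet⟩ := pvM9_succ (i / 6)
    have htop5 : dig (m9 (i / 6) % 3) 5 < 10 := (pvDig_good _ (hc3 _) 5 (by omega)).2
    have hbot0 : dig (m9 (i / 6 + 1) % 3) 0 < 10 := (pvDig_good _ (hc3 _) 0 (by omega)).2
    unfold altN
    rw [hdiv, hmod, hr5]
    constructor
    · omega
    · intro z hz1 hz2
      have hzq1 : m9 (i / 6) ≤ z / 10 := by omega
      have hzq2 : z / 10 ≤ m9 (i / 6 + 1) := by omega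
      have hsplit : z = 10 * (z / 10) + z % 10 := by omega
      rcases Nat.eq_or_lt_of_le hzq1 with heq | hgt
      · -- still in the old decade, above the top good digit
        rw [hsplit, ← heq, pvGood_decade _ _ (pvM9_free _) (by omega)]
        exact pvDig_top _ (hc3 _) _ (by omega) (by omega)
      · rcases Nat.eq_or_lt_of_le hzq2 with heq' | hlt'
        · -- in the new decade, below the bottom good digit
          rw [hsplit, heq', pvGood_decade _ _ (pvM9_free _) (by omega)]
          exact pvDig_bot _ (hc3 _) _ (by omega)
        · -- strictly between: the decade prefix itself contains a 3
          unfold goodb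
          rw [hsplit, pvHas3_step (z / 10) (z % 10) (by omega)]
          rw [hbet (z / 10) hgt hlt']
          simp

theorem pvGoodb_one : goodb 1 = true := by
  have h1 : has3 1 = false := by
    rw [← Bool.not_eq_true, pvHas3_iff]
    rw [Nat.digits_def' (by norm_num : 1 < 10) (by norm_num : 0 < 1)]
    simp
  simp [goodb, h1]

theorem pvAltN_zero : altN 0 = 1 := by
  unfold altN
  rw [show (0 / 6 : Nat) = 0 from rfl, show (0 % 6 : Nat) = 0 from rfl,
    show m9 0 = 0 from by rw [m9]; simp]
  decide

theorem pvMainSeq (i : Nat) : nthF i 1 = altN i := by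
  induction i with
  | zero =>
    show nxtGE 1 = altN 0
    rw [pvAltN_zero, nxtGE, if_pos pvGoodb_one]
  | succ i ih =>
    rw [pvNthF_succ, ih]
    obtain ⟨hlt, hbet⟩ := pvAltN_step i
    exact pvNxtGE_eq _ _ (by omega) (pvAltN_good (i + 1))
      (fun z hz1 hz2 => hbet z (by omega) hz2)

-- bridge: the Int port pFree computes m9 on non-negative inputs
theorem pvPFree_m9 (k : Nat) : pFree (k : Int) = ((m9 k : Nat) : Int) := by
  induction k using Nat.strong_induction_on with
  | _ k ih =>
    by_cases hk : k = 0
    · subst hk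
      rw [pFree, if_pos (by norm_num)]
      rw [show m9 0 = 0 from by rw [m9]; simp]
      rfl
    · rw [pFree, if_neg (by omega : ¬ (k : Int) ≤ 0)]
      rw [show PySem.Int.floordiv (k : Int) 9 = ((k / 9 : Nat) : Int) from by
        exact_mod_cast PySem.Int.floordiv_natCast k 9]
      rw [show PySem.Int.mod (k : Int) 9 = ((k % 9 : Nat) : Int) from by
        exact_mod_cast PySem.Int.mod_natCast k 9]
      rw [ih (k / 9) (Nat.div_lt_self (by omega) (by omega))]
      rw [pvM9_eq k]
      have hmp : (if ((k % 9 : Nat) : Int) < 3 then ((k % 9 : Nat) : Int)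
          else ((k % 9 : Nat) : Int) + 1) = ((mp (k % 9) : Nat) : Int) := by
        unfold mp
        by_cases h : k % 9 < 3
        · rw [if_pos h, if_pos (by exact_mod_cast h)]
        · rw [if_neg h, if_neg (by exact_mod_cast h)]
          push_cast; ring
      rw [hmp]
      push_cast; ring

-- bridge: the Int port solution_alt computes altN for n ≥ 1
theorem pvSolutionAlt_altN (n : Int) (hn : 1 ≤ n) :
    solution_alt n = ((altN (n.toNat - 1) : Nat) : Int) := by
  have hn1 : n - 1 = ((n.toNat - 1 : Nat) : Int) := by omega
  set i := n.toNat - 1 with hi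
  unfold solution_alt
  rw [hn1]
  rw [show PySem.Int.floordiv ((i : Nat) : Int) 6 = ((i / 6 : Nat) : Int) from by
    exact_mod_cast PySem.Int.floordiv_natCast i 6]
  rw [show PySem.Int.mod ((i : Nat) : Int) 6 = ((i % 6 : Nat) : Int) from by
    exact_mod_cast PySem.Int.mod_natCast i 6]
  rw [pvPFree_m9]
  rw [show PySem.Int.mod ((m9 (i / 6) : Nat) : Int) 3 = ((m9 (i / 6) % 3 : Nat) : Int) from by
    exact_mod_cast PySem.Int.mod_natCast (m9 (i / 6)) 3]
  have hc : m9 (i / 6) % 3 < 3 := Nat.mod_lt _ (by omega)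
  have hr : i % 6 < 6 := Nat.mod_lt _ (by omega)
  unfold altN
  set c := m9 (i / 6) % 3 with hcdef
  set r := i % 6 with hrdef
  have hlk : PySem.List.pyGetD
      (PySem.List.pyGetD
        ([[1, 2, 4, 5, 7, 8], [0, 1, 4, 6, 7, 9], [0, 2, 5, 6, 8, 9]] : List (List Int))
        ((c : Nat) : Int) [])
      ((r : Nat) : Int) 0 = ((dig c r : Nat) : Int) := by
    unfold dig
    interval_cases c <;> interval_cases r <;> rfl
  rw [hlk]
  push_cast; ring

theorem pvSolution_zero : solution 0 = 1 := by
  rw [solution, pvLoopA_rest]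
  rw [show ((0 : Int) + 1 - (([] : List Int).length : Int)).toNat = 1 from by simp]
  rw [pvRest_cons 1 1 (by omega)]
  rw [show (1 - 1 : Nat) = 0 from rfl, rest, if_neg (by omega : ¬ 0 < 0)]
  rw [show nxtGE 1 = 1 from by rw [nxtGE, if_pos pvGoodb_one]]
  rfl

theorem pvSolutionAlt_zero : solution_alt 0 = 8 := by
  unfold solution_alt
  rw [show pFree (PySem.Int.floordiv (0 - 1) 6) = 0 from by
    rw [pFree, if_pos (by decide : PySem.Int.floordiv (0 - 1) 6 ≤ 0)]]
  decide

theorem pvMain (n : Int) (hn : 1 ≤ n) : solution n = solution_alt n := by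
  rw [solution, pvLoopA_rest]
  simp only [List.nil_append, List.length_nil, Nat.cast_zero, sub_zero]
  rw [show (n + 1).toNat = n.toNat + 1 from by omega]
  have hlen := pvRest_length (n.toNat + 1) 1
  have hnt : 1 ≤ n.toNat := by omega
  have hlast := pvLastRest (n.toNat - 1) 1
  rw [show n.toNat - 1 + 1 = n.toNat from by omega] at hlast
  rw [List.getLast?_eq_getElem?, pvRest_length] at hlast
  have hbound : (n - 1 : Int) < ((rest (n.toNat + 1) 1).length : Int) := by
    rw [hlen]; omega
  rw [PySem.List.pyGetD_eq_getElem _ _ (by omega) hbound]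
  obtain ⟨t, htt⟩ := pvRest_prefix n.toNat 1
  have hidx : ((n : Int) - 1).toNat = n.toNat - 1 := by omega
  have hq : (rest (n.toNat + 1) 1)[(n - 1 : Int).toNat]?
      = some ((nthF (n.toNat - 1) 1 : Nat) : Int) := by
    rw [← htt, List.getElem?_append_left (by rw [pvRest_length]; omega), hidx]
    simpa using hlast
  have := List.getElem?_eq_getElem
    (l := rest (n.toNat + 1) 1) (i := (n - 1 : Int).toNat) (by rw [pvRest_length]; omega)
  rw [this] at hq
  rw [Option.some.inj hq, pvMainSeq, pvSolutionAlt_altN n hn]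

-- ===== VERDICT (by name: the statement is the Claim_ definition above) =====
theorem solution_spec : Claim_unchanged_solution := by
  intro n _ hpre hD
  have hn : 1 ≤ n := by
    have h0 : (0 : Int) ≤ n := hpre
    have h1 : n ≠ 0 := hD
    omega
  exact pvMain n hn

theorem solution_changed : Claim_changed_solution := by
  unfold Claim_changed_solution
  refine ⟨by decide, by decide, rfl, pvSolution_zero, pvSolutionAlt_zero, by decide⟩

theorem solution_tight : Claim_exact_solution := by
  intro n _ _ hD
  have : n = 0 := hD
  subst this
  rw [pvSolution_zero, pvSolutionAlt_zero]
  decide
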